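-- pv_equiv track=rewrite | github.com/wix-incubator/DLT | dlt/diffusion.py | mapping_cont2disc
-- ===== SOURCE A (Python) =====
-- def mapping_cont2disc(num_cont_steps, num_discrete_steps):
--     block_size = num_cont_steps // num_discrete_steps
--     cont2disc = {}
--     for i in range(num_cont_steps):
--         if i >= (num_discrete_steps - 1) * block_size:
--             if num_cont_steps % num_discrete_steps != 0 and i >= num_discrete_steps * block_size:
--                 cont2disc[i] = num_discrete_steps - 1
--             else:
--                 cont2disc[i] = i // block_size
--         else:
--             cont2disc[i] = i // block_size
--     return cont2disc
-- ===== SOURCE B (Python) =====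
-- def mapping_cont2disc(num_cont_steps, num_discrete_steps):
--     block_size = num_cont_steps // num_discrete_steps
--     cont2disc = {}
--     if block_size == 0:
--         # fewer continuous steps than buckets: every step lands in the last bucket
--         for i in range(num_cont_steps):
--             cont2disc[i] = num_discrete_steps - 1
--         return cont2disc
--     bucket = 0
--     boundary = block_size
--     for i in range(num_cont_steps):
--         while bucket < num_discrete_steps - 1 and i >= boundary:
--             bucket += 1
--             boundary += block_size
--         cont2disc[i] = bucket
--     return cont2disc
-- ===== Notes on version B (the rewrite author's own statement) =====
-- stated objective: alternative
-- what changed: Replaces A's per-index floor division and remainder-branch with a single pass that maintains a running bucket counter and next block boundary, advancing the bucket by comparison only (no division inside the loop).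
-- intended difference: For num_discrete_steps <= -1 with num_cont_steps >= 2 (a meaningless negative bucket count) A returns negative bucket labels produced accidentally by floor division, while B labels every step 0; non-negative labels are the sane choice on this unspecified corner. — e.g. on mapping_cont2disc(2, -1): A returns [(0, 0), (1, -1)], B returns [(0, 0), (1, 0)]
import Mathlib
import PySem

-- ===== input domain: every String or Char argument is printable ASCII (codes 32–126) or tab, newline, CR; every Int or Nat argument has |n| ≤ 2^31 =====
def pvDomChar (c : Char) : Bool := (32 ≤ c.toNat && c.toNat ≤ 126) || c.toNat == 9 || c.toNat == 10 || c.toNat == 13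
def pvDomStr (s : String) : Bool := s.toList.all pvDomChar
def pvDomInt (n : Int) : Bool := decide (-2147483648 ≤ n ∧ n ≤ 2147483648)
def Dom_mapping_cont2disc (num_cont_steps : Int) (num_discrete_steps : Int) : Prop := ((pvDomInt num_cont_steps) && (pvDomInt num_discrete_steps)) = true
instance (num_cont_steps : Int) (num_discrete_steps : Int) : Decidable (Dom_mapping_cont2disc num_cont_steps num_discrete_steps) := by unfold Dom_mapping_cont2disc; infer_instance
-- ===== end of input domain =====

-- B replaces A's per-index floor division with a running bucket counter advanced by
-- boundary comparisons only (objective: alternative, no division inside the loop).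

-- ===== PORT A =====
def mapping_cont2disc (num_cont_steps : Int) (num_discrete_steps : Int) : List (Int × Int) :=
  let block_size := PySem.Int.floordiv num_cont_steps num_discrete_steps
  let cont2disc := (PySem.List.pyRange 0 num_cont_steps 1).foldl
    (fun (m : PySem.Dict Int Int) (i : Int) =>
      if (num_discrete_steps - 1) * block_size ≤ i then
        if PySem.Int.mod num_cont_steps num_discrete_steps ≠ 0 ∧ num_discrete_steps * block_size ≤ i then
          m.insert i (num_discrete_steps - 1)
        else
          m.insert i (PySem.Int.floordiv i block_size)
      else
        m.insert i (PySem.Int.floordiv i block_size))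
    PySem.Dict.empty
  cont2disc.items

-- ===== PORT B =====
-- Source B's inner `while bucket < d - 1 and i >= boundary` loop, as fuel recursion
-- (fuel = bucket headroom d-1-bucket, exactly the number of increments still possible;
--  the guard is re-checked unchanged at every step, so this is exact).
def pvBumpAux (d bs : Int) : Nat → Int → Int → Int → Int × Int
  | 0, k, b, _ => (k, b)
  | fuel+1, k, b, i => if k < d - 1 ∧ b ≤ i then pvBumpAux d bs fuel (k+1) (b+bs) i else (k, b)

def pvBump (d bs k b i : Int) : Int × Int := pvBumpAux d bs (d - 1 - k).toNat k b i

-- the body of Source B's `for i in range(...)` loop; state = (dict, bucket, boundary)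
def pvStepB (d bs : Int) (st : PySem.Dict Int Int × Int × Int) (i : Int) :
    PySem.Dict Int Int × Int × Int :=
  let kb := pvBump d bs st.2.1 st.2.2 i
  (st.1.insert i kb.1, kb.1, kb.2)

def mapping_cont2disc_alt (num_cont_steps : Int) (num_discrete_steps : Int) : List (Int × Int) :=
  let block_size := PySem.Int.floordiv num_cont_steps num_discrete_steps
  if block_size = 0 then
    -- fewer continuous steps than buckets: every step lands in the last bucket
    ((PySem.List.pyRange 0 num_cont_steps 1).foldl
      (fun (m : PySem.Dict Int Int) (i : Int) => m.insert i (num_discrete_steps - 1))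
      PySem.Dict.empty).items
  else
    ((PySem.List.pyRange 0 num_cont_steps 1).foldl
      (pvStepB num_discrete_steps block_size)
      (PySem.Dict.empty, 0, block_size)).1.items

-- ===== PRECONDITION & SPEC =====
-- Pre_ excludes exactly num_discrete_steps = 0, where the Python A raises ZeroDivisionError.
def Pre_mapping_cont2disc (num_cont_steps : Int) (num_discrete_steps : Int) : Prop :=
  num_discrete_steps ≠ 0
instance (num_cont_steps : Int) (num_discrete_steps : Int) : Decidable (Pre_mapping_cont2disc num_cont_steps num_discrete_steps) := by unfold Pre_mapping_cont2disc; infer_instance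
def pvWitness_mapping_cont2disc : Int × Int := (10, 3)

-- For num_discrete_steps ≤ -1 with num_cont_steps ≥ 2 (a meaningless negative bucket count)
-- A returns negative bucket labels produced accidentally by floor division, while B labels
-- every step 0; non-negative labels are the sane choice on this unspecified corner.
def D_mapping_cont2disc (num_cont_steps : Int) (num_discrete_steps : Int) : Prop :=
  2 ≤ num_cont_steps ∧ num_discrete_steps ≤ -1
instance (num_cont_steps : Int) (num_discrete_steps : Int) : Decidable (D_mapping_cont2disc num_cont_steps num_discrete_steps) := by unfold D_mapping_cont2disc; infer_instance

def Spec_mapping_cont2disc (num_cont_steps : Int) (num_discrete_steps : Int) (out : List (Int × Int)) : Prop := ¬ D_mapping_cont2disc num_cont_steps num_discrete_steps → out = mapping_cont2disc_alt num_cont_steps num_discrete_steps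
instance (num_cont_steps : Int) (num_discrete_steps : Int) (out : List (Int × Int)) : Decidable (Spec_mapping_cont2disc num_cont_steps num_discrete_steps out) := by unfold Spec_mapping_cont2disc; infer_instance

def pvDiffWitness_mapping_cont2disc : Int × Int := (2, -1)
def pvDiffWitnessOut_mapping_cont2disc : (List (Int × Int)) × (List (Int × Int)) :=
  ([(0, 0), (1, -1)], [(0, 0), (1, 0)])

-- ===== CLAIM (what is proved, stated in full; the proofs are below) =====
def Claim_unchanged_mapping_cont2disc : Prop := ∀ (num_cont_steps : Int) (num_discrete_steps : Int), Dom_mapping_cont2disc num_cont_steps num_discrete_steps → Pre_mapping_cont2disc num_cont_steps num_discrete_steps → Spec_mapping_cont2disc num_cont_steps num_discrete_steps (mapping_cont2disc num_cont_steps num_discrete_steps)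
def Claim_changed_mapping_cont2disc : Prop := Dom_mapping_cont2disc (pvDiffWitness_mapping_cont2disc.1) (pvDiffWitness_mapping_cont2disc.2) ∧ Pre_mapping_cont2disc (pvDiffWitness_mapping_cont2disc.1) (pvDiffWitness_mapping_cont2disc.2) ∧ D_mapping_cont2disc (pvDiffWitness_mapping_cont2disc.1) (pvDiffWitness_mapping_cont2disc.2) ∧ mapping_cont2disc (pvDiffWitness_mapping_cont2disc.1) (pvDiffWitness_mapping_cont2disc.2) = pvDiffWitnessOut_mapping_cont2disc.1 ∧ mapping_cont2disc_alt (pvDiffWitness_mapping_cont2disc.1) (pvDiffWitness_mapping_cont2disc.2) = pvDiffWitnessOut_mapping_cont2disc.2 ∧ pvDiffWitnessOut_mapping_cont2disc.1 ≠ pvDiffWitnessOut_mapping_cont2disc.2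
def Claim_exact_mapping_cont2disc : Prop := ∀ (num_cont_steps : Int) (num_discrete_steps : Int), Dom_mapping_cont2disc num_cont_steps num_discrete_steps → Pre_mapping_cont2disc num_cont_steps num_discrete_steps → D_mapping_cont2disc num_cont_steps num_discrete_steps → mapping_cont2disc num_cont_steps num_discrete_steps ≠ mapping_cont2disc_alt num_cont_steps num_discrete_steps

-- ===== LEMMAS AND PROOFS =====

-- A's per-index value, extracted
def pvAval (n d bs i : Int) : Int :=
  if (d - 1) * bs ≤ i then
    if PySem.Int.mod n d ≠ 0 ∧ d * bs ≤ i then d - 1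
    else PySem.Int.floordiv i bs
  else PySem.Int.floordiv i bs

-- pvBump satisfies the while-loop unfolding equation
lemma pvBump_eq (d bs k b i : Int) :
    pvBump d bs k b i = if k < d - 1 ∧ b ≤ i then pvBump d bs (k+1) (b+bs) i else (k, b) := by
  unfold pvBump
  rcases h : (d - 1 - k).toNat with _ | f
  · have hk : ¬ k < d - 1 := by omega
    simp [pvBumpAux, hk]
  · have hf : (d - 1 - (k+1)).toNat = f := by omega
    simp only [pvBumpAux, hf]

lemma pvBump_not (d bs k b i : Int) (h : ¬ (k < d - 1 ∧ b ≤ i)) :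
    pvBump d bs k b i = (k, b) := by
  rw [pvBump_eq, if_neg h]

-- A's items are the range mapped through pvAval
lemma A_items (n d : Int) :
    mapping_cont2disc n d
      = (PySem.List.pyRange 0 n 1).map (fun i => (i, pvAval n d (PySem.Int.floordiv n d) i)) := by
  have key := PySem.Dict.items_foldl_insert_fresh (PySem.List.pyRange 0 n 1) (fun i => i)
      (fun i => pvAval n d (PySem.Int.floordiv n d) i) PySem.Dict.empty
      (by intro a _; rfl) (by simpa using PySem.List.nodup_pyRange_one 0 n)
  have hfn : (fun (m : PySem.Dict Int Int) (i : Int) =>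
      if (d - 1) * PySem.Int.floordiv n d ≤ i then
        if PySem.Int.mod n d ≠ 0 ∧ d * PySem.Int.floordiv n d ≤ i then
          m.insert i (d - 1)
        else
          m.insert i (PySem.Int.floordiv i (PySem.Int.floordiv n d))
      else
        m.insert i (PySem.Int.floordiv i (PySem.Int.floordiv n d)))
      = fun (m : PySem.Dict Int Int) (i : Int) =>
          m.insert i (pvAval n d (PySem.Int.floordiv n d) i) := by
    funext m i; simp only [pvAval]; split_ifs <;> rfl
  simp only [mapping_cont2disc]
  rw [hfn]
  simpa using key

-- the generic loop invariant for B's fold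
lemma foldB_inv (d bs : Int) (K Bf : Int → Int) (hK0 : K 0 = 0) (hB0 : Bf 0 = bs) (n : Int)
    (hstep : ∀ i : Int, 0 ≤ i → i < n → pvBump d bs (K i) (Bf i) i = (K (i+1), Bf (i+1))) :
    ∀ j : Nat, (j : Int) ≤ n →
      ((PySem.List.pyRange 0 (j : Int) 1).foldl (pvStepB d bs) (PySem.Dict.empty, 0, bs)).1.items
          = (PySem.List.pyRange 0 (j : Int) 1).map (fun i => (i, K (i+1)))
        ∧ ((PySem.List.pyRange 0 (j : Int) 1).foldl (pvStepB d bs) (PySem.Dict.empty, 0, bs)).2.1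
          = K (j : Int)
        ∧ ((PySem.List.pyRange 0 (j : Int) 1).foldl (pvStepB d bs) (PySem.Dict.empty, 0, bs)).2.2
          = Bf (j : Int) := by
  intro j
  induction j with
  | zero =>
    intro _
    rw [show ((0 : Nat) : Int) = 0 by norm_num, PySem.List.pyRange_one_eq_nil (le_refl 0)]
    exact ⟨rfl, hK0.symm, hB0.symm⟩
  | succ j ih =>
    intro hj1
    have hj : (j : Int) ≤ n := by push_cast at hj1 ⊢; omega
    obtain ⟨hI, hK, hB⟩ := ih hj
    have hcast : ((j + 1 : Nat) : Int) = (j : Int) + 1 := by push_cast; ring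
    rw [hcast, PySem.List.pyRange_one_succ_right (by exact_mod_cast Nat.zero_le j)]
    rw [List.foldl_append, List.foldl_cons, List.foldl_nil]
    set S := (PySem.List.pyRange 0 (j : Int) 1).foldl (pvStepB d bs) (PySem.Dict.empty, 0, bs) with hS
    have hb : pvBump d bs S.2.1 S.2.2 (j : Int) = (K ((j : Int) + 1), Bf ((j : Int) + 1)) := by
      rw [hK, hB]; exact hstep _ (by exact_mod_cast Nat.zero_le j) (by omega)
    have hcont : S.1.contains (j : Int) = false := by
      have hkeys : S.1.keys = PySem.List.pyRange 0 (j : Int) 1 := by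
        show S.1.items.map Prod.fst = _
        rw [hI]; simp [Function.comp_def]
      cases h : S.1.contains (j : Int) with
      | false => rfl
      | true =>
        exfalso
        have := (PySem.Dict.contains_iff_mem_keys S.1 (j : Int)).mp h
        rw [hkeys, PySem.List.mem_pyRange_one] at this
        omega
    refine ⟨?_, ?_, ?_⟩
    · show (S.1.insert (j : Int) (pvBump d bs S.2.1 S.2.2 (j : Int)).1).items = _
      rw [hb]
      rw [PySem.Dict.items_insert_of_not_contains S.1 (K ((j : Int) + 1)) hcont, hI,
        List.map_append]
      simp
    · show (pvBump d bs S.2.1 S.2.2 (j : Int)).1 = _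
      rw [hb]
    · show (pvBump d bs S.2.1 S.2.2 (j : Int)).2 = _
      rw [hb]

-- floor division of a positive by a negative is at most -1
lemma pv_floordiv_neg (n d : Int) (hn : 0 < n) (hd : d ≤ -1) :
    PySem.Int.floordiv n d ≤ -1 := by
  have h := PySem.Int.floordiv_mul_add_mod n d
  have hm := PySem.Int.mod_neg_bounds n (show d < 0 by omega)
  by_contra hq
  push_neg at hq
  have hq0 : 0 ≤ PySem.Int.floordiv n d := by omega
  have h3 : PySem.Int.floordiv n d * d ≤ 0 :=
    mul_nonpos_iff.mpr (Or.inl ⟨hq0, by omega⟩)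
  linarith

-- 1 // d = -1 for d ≤ -1
lemma pv_floordiv_one_neg (d : Int) (hd : d ≤ -1) : PySem.Int.floordiv 1 d = -1 := by
  have h := PySem.Int.floordiv_mul_add_mod 1 d
  have hm := PySem.Int.mod_neg_bounds 1 (show d < 0 by omega)
  have hle : PySem.Int.floordiv 1 d ≤ -1 := pv_floordiv_neg 1 d (by omega) hd
  have hge : -1 ≤ PySem.Int.floordiv 1 d := by
    by_contra hlt
    push_neg at hlt
    have h1 : (1 : Int) ≤ -(PySem.Int.floordiv 1 d + 1) := by omega
    have h2 : (1 : Int) ≤ -d := by omega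
    have h3 : (1 : Int) * 1 ≤ (-(PySem.Int.floordiv 1 d + 1)) * (-d) :=
      mul_le_mul h1 h2 (by omega) (by omega)
    have h4 : (-(PySem.Int.floordiv 1 d + 1)) * (-d)
        = PySem.Int.floordiv 1 d * d + d := by ring
    linarith
  omega

-- ===== proofs of the main case d ≥ 1 =====

lemma pv_aval_bs_zero (n d : Int) (hn : 1 ≤ n)
    (hbs : PySem.Int.floordiv n d = 0) (i : Int) (h0 : 0 ≤ i) :
    pvAval n d 0 i = d - 1 := by
  have h := PySem.Int.floordiv_mul_add_mod n d
  rw [hbs] at h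
  have hm : PySem.Int.mod n d = n := by linarith
  unfold pvAval
  rw [mul_zero, mul_zero, if_pos h0, if_pos ⟨by rw [hm]; omega, h0⟩]

lemma pv_aval_bs_pos (n d bs : Int) (hd : 1 ≤ d) (hbs : 0 < bs)
    (hbsv : PySem.Int.floordiv n d = bs) (i : Int) (h0 : 0 ≤ i) (hin : i < n) :
    pvAval n d bs i = min (i / bs) (d - 1) := by
  have hfd : PySem.Int.floordiv i bs = i / bs := PySem.Int.floordiv_eq_ediv_of_pos hbs
  unfold pvAval
  split_ifs with h1 h2
  · -- value d - 1 : show d - 1 = min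
    have : d - 1 ≤ i / bs := (Int.le_ediv_iff_mul_le hbs).mpr h1
    omega
  · -- else branch inside: i // bs, and i < d * bs (directly or via mod = 0)
    rw [hfd]
    have hlt : i < d * bs := by
      push_neg at h2
      by_cases hm : PySem.Int.mod n d = 0
      · have h := PySem.Int.floordiv_mul_add_mod n d
        rw [hbsv, hm] at h
        have : n = d * bs := by linarith [mul_comm bs d]
        omega
      · exact h2 hm
    have hub : i / bs < d := (Int.ediv_lt_iff_lt_mul hbs).mpr (by linarith)
    have hlb : d - 1 ≤ i / bs := (Int.le_ediv_iff_mul_le hbs).mpr h1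
    omega
  · -- i < (d-1) * bs
    rw [hfd]
    push_neg at h1
    have hub : i / bs < d - 1 := (Int.ediv_lt_iff_lt_mul hbs).mpr (by linarith)
    omega

lemma B_case_zero (n d : Int) (hn : 1 ≤ n)
    (hbs : PySem.Int.floordiv n d = 0) :
    mapping_cont2disc_alt n d = (PySem.List.pyRange 0 n 1).map (fun i => (i, d - 1)) := by
  have key := PySem.Dict.items_foldl_insert_fresh (PySem.List.pyRange 0 n 1) (fun i => i)
      (fun _ : Int => d - 1) PySem.Dict.empty
      (by intro a _; rfl) (by simpa using PySem.List.nodup_pyRange_one 0 n)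
  simp only [mapping_cont2disc_alt, hbs, if_pos rfl]
  simpa using key

lemma B_case_pos (n d bs : Int) (hd : 1 ≤ d) (hn : 1 ≤ n) (hbs : 0 < bs)
    (hbsv : PySem.Int.floordiv n d = bs) :
    mapping_cont2disc_alt n d
      = (PySem.List.pyRange 0 n 1).map (fun i => (i, min (i / bs) (d - 1))) := by
  set K : Int → Int := fun x => if x ≤ 0 then 0 else min ((x - 1) / bs) (d - 1) with hKdef
  set Bf : Int → Int := fun x => (K x + 1) * bs with hBdef
  have hstep : ∀ i : Int, 0 ≤ i → i < n → pvBump d bs (K i) (Bf i) i = (K (i + 1), Bf (i + 1)) := by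
    intro i h0 hin
    have hKip : K (i + 1) = min (i / bs) (d - 1) := by
      simp only [hKdef]
      rw [if_neg (by omega : ¬ i + 1 ≤ 0)]
      norm_num
    by_cases hi : i ≤ 0
    · have hi0 : i = 0 := by omega
      subst hi0
      have hK0 : K 0 = 0 := by simp [hKdef]
      have hB0 : Bf 0 = bs := by simp [hBdef, hK0]
      rw [hK0, hB0, pvBump_not _ _ _ _ _ (by omega)]
      have : K (0 + 1) = 0 := by
        rw [hKip]
        have : (0 : Int) / bs = 0 := Int.zero_ediv bs
        omega
      rw [show (0:Int) + 1 = 1 by ring] at this ⊢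
      rw [this, hBdef]
      simp [this]
    · -- i ≥ 1
      have hi1 : 1 ≤ i := by omega
      set k : Int := min ((i - 1) / bs) (d - 1) with hkdef
      have hKi : K i = k := by simp only [hKdef]; rw [if_neg (by omega)]
      have hBi : Bf i = (k + 1) * bs := by simp only [hBdef, hKi]
      have hq0 : 0 ≤ (i - 1) / bs := Int.ediv_nonneg (by omega) hbs.le
      have hmono : (i - 1) / bs ≤ i / bs := Int.ediv_le_ediv hbs (by omega)
      rw [hKi, hBi]
      by_cases hk : k < d - 1
      · have hkq : k = (i - 1) / bs := by omega
        by_cases hbi : (k + 1) * bs ≤ i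
        · -- one iteration of the while loop
          rw [pvBump_eq, if_pos ⟨hk, hbi⟩]
          have hlt : i - 1 < ((i - 1) / bs + 1) * bs := Int.lt_ediv_add_one_mul_self _ hbs
          rw [← hkq] at hlt
          have h2 : i < (k + 1) * bs + bs := by omega
          rw [pvBump_not _ _ _ _ _ (by omega)]
          have hdiv : i / bs = k + 1 := by
            have hge : k + 1 ≤ i / bs := (Int.le_ediv_iff_mul_le hbs).mpr hbi
            have hrng : (k + 2) * bs = (k + 1) * bs + bs := by ring
            have hup : i / bs < k + 2 := (Int.ediv_lt_iff_lt_mul hbs).mpr (by omega)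
            omega
          have hK1 : K (i + 1) = k + 1 := by rw [hKip, hdiv]; omega
          rw [hK1, hBdef]
          simp only [hK1, Prod.mk.injEq]
          exact ⟨trivial, by ring⟩
        · -- no iteration
          push_neg at hbi
          rw [pvBump_not _ _ _ _ _ (by omega)]
          have hdiv : i / bs = k := by
            have hup : i / bs < k + 1 := (Int.ediv_lt_iff_lt_mul hbs).mpr hbi
            omega
          have hK1 : K (i + 1) = k := by rw [hKip, hdiv]; omega
          rw [hK1, hBdef]
          simp only [hK1]
      · -- k = d - 1 : bucket saturated
        have hkeq : k = d - 1 := by omega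
        rw [pvBump_not _ _ _ _ _ (by omega)]
        have hK1 : K (i + 1) = k := by
          rw [hKip]
          have : d - 1 ≤ (i - 1) / bs := by omega
          omega
        rw [hK1, hBdef]
        simp only [hK1]
    -- end hstep
  have hinv := foldB_inv d bs K Bf (by simp [hKdef]) (by simp [hBdef, hKdef]) n hstep n.toNat
      (by rw [Int.toNat_of_nonneg (by omega)])
  have hcast : ((n.toNat : Nat) : Int) = n := Int.toNat_of_nonneg (by omega)
  rw [hcast] at hinv
  simp only [mapping_cont2disc_alt, hbsv]
  rw [if_neg (by omega : ¬ bs = 0)]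
  rw [hinv.1]
  apply List.map_congr_left
  intro a ha
  rw [PySem.List.mem_pyRange_one] at ha
  have : K (a + 1) = min (a / bs) (d - 1) := by
    simp only [hKdef]
    rw [if_neg (by omega : ¬ a + 1 ≤ 0)]
    norm_num
  rw [this]

-- B with a negative bucket count labels every step 0
lemma B_case_neg (n d : Int) (hd : d ≤ -1) (hn : 1 ≤ n) :
    mapping_cont2disc_alt n d
      = (PySem.List.pyRange 0 n 1).map (fun i => (i, (0 : Int))) := by
  set bs := PySem.Int.floordiv n d with hbs
  have hstep : ∀ i : Int, 0 ≤ i → i < n →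
      pvBump d bs ((fun _ : Int => (0 : Int)) i) ((fun _ : Int => bs) i) i
      = ((fun _ : Int => (0 : Int)) (i + 1), (fun _ : Int => bs) (i + 1)) := by
    intro i _ _
    show pvBump d bs 0 bs i = (0, bs)
    exact pvBump_not _ _ _ _ _ (by omega)
  have hinv := foldB_inv d bs (fun _ : Int => (0 : Int)) (fun _ : Int => bs) rfl rfl n hstep
      n.toNat (by rw [Int.toNat_of_nonneg (by omega)])
  have hcast : ((n.toNat : Nat) : Int) = n := Int.toNat_of_nonneg (by omega)
  rw [hcast] at hinv
  have hbsn : bs ≤ -1 := pv_floordiv_neg n d (by omega) hd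
  simp only [mapping_cont2disc_alt, ← hbs]
  rw [if_neg (by omega : ¬ bs = 0)]
  exact hinv.1

-- ===== VERDICT (by name: the statement is the Claim_ definition above) =====
theorem mapping_cont2disc_spec : Claim_unchanged_mapping_cont2disc := by
  unfold Claim_unchanged_mapping_cont2disc
  intro n d _ hPre
  intro hD
  unfold Pre_mapping_cont2disc at hPre
  unfold D_mapping_cont2disc at hD
  by_cases hn : n ≤ 0
  · simp [mapping_cont2disc, mapping_cont2disc_alt, PySem.List.pyRange_one_eq_nil hn]
  · have hn1 : 1 ≤ n := by omega
    by_cases hd : 1 ≤ d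
    · have hbs0 : 0 ≤ PySem.Int.floordiv n d := by
        rw [PySem.Int.floordiv_eq_ediv_of_pos (by omega)]
        exact Int.ediv_nonneg (by omega) (by omega)
      rcases eq_or_lt_of_le hbs0 with hbz | hbp
      · -- block_size = 0
        rw [A_items, B_case_zero n d hn1 hbz.symm]
        apply List.map_congr_left
        intro a ha
        rw [PySem.List.mem_pyRange_one] at ha
        rw [← hbz, pv_aval_bs_zero n d hn1 hbz.symm a ha.1]
      · -- block_size ≥ 1
        rw [A_items, B_case_pos n d (PySem.Int.floordiv n d) hd hn1 hbp rfl]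
        apply List.map_congr_left
        intro a ha
        rw [PySem.List.mem_pyRange_one] at ha
        rw [pv_aval_bs_pos n d (PySem.Int.floordiv n d) hd hbp rfl a ha.1 ha.2]
    · -- d ≤ -1, and ¬D forces n = 1
      have hd1 : d ≤ -1 := by omega
      have hn1' : n = 1 := by omega
      subst hn1'
      have hbs : PySem.Int.floordiv 1 d = -1 := pv_floordiv_one_neg d hd1
      have hr : PySem.List.pyRange 0 1 1 = [0] := by
        have := PySem.List.pyRange_one_singleton (0 : Int)
        norm_num at this
        exact this
      simp only [mapping_cont2disc, mapping_cont2disc_alt, hbs, hr,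
        List.foldl_cons, List.foldl_nil]
      rw [if_neg (by norm_num : ¬ (-1 : Int) = 0)]
      have hc1 : ¬ ((d - 1) * (-1 : Int) ≤ 0) := by
        have : (d - 1) * (-1 : Int) = 1 - d := by ring
        omega
      rw [if_neg hc1]
      have hz : PySem.Int.floordiv 0 (-1) = 0 := by decide
      rw [hz]
      have hbmp : pvBump d (-1) 0 (-1) 0 = (0, -1) := pvBump_not _ _ _ _ _ (by omega)
      simp only [pvStepB, hbmp]

theorem mapping_cont2disc_changed : Claim_changed_mapping_cont2disc := by
  unfold Claim_changed_mapping_cont2disc; decide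

theorem mapping_cont2disc_tight : Claim_exact_mapping_cont2disc := by
  unfold Claim_exact_mapping_cont2disc
  intro n d _ _ hD
  unfold D_mapping_cont2disc at hD
  obtain ⟨hn2, hd1⟩ := hD
  intro heq
  rw [A_items, B_case_neg n d hd1 (by omega)] at heq
  rw [List.map_inj_left] at heq
  have h1 := heq 1 (by rw [PySem.List.mem_pyRange_one]; omega)
  have hval : pvAval n d (PySem.Int.floordiv n d) 1 = 0 := congrArg Prod.snd h1
  have hbsn : PySem.Int.floordiv n d ≤ -1 := pv_floordiv_neg n d (by omega) hd1
  have hfo : PySem.Int.floordiv 1 (PySem.Int.floordiv n d) = -1 :=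
    pv_floordiv_one_neg _ hbsn
  unfold pvAval at hval
  split_ifs at hval
  · omega
  · rw [hfo] at hval; omega
  · rw [hfo] at hval; omega
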